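-- pv_equiv track=rewrite | github.com/Adasiak/SPD | Jackson/4.py | jackson
-- ===== SOURCE A (Python) =====
-- def Cmax(permutation, tasks):
--     n = len(permutation)
--     m = len(tasks[0])
--     C = [[0] * (m+1) for _ in range(n+1)]
--     for i in range(1, n+1):
--         for j in range(1, m+1):
--             C[i][j] = max(C[i-1][j], C[i][j-1]) + tasks[permutation[i-1]][j-1]
--     return C[n][m]
--
-- def jackson(tasks):
--     n = len(tasks)
--     # Tworzymy listę zadań do wykonania, posortowaną względem terminów dostępności
--     available_tasks = sorted(range(n), key=lambda x: tasks[x][0])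
--     # Inicjalizujemy permutację wynikową jako pustą listę
--     result_permutation = []
--     # Dla każdego zadania w kolejności terminów dostępności
--     for task_idx in available_tasks:
--         # Szukamy pozycji w permutacji wynikowej, w której można umieścić to zadanie,
--         # tak, aby minimalizować wartość Cmax
--         best_pos = 0
--         best_Cmax = float('inf')
--         for pos in range(len(result_permutation)+1):
--             curr_permutation = result_permutation[:pos] + [task_idx] + result_permutation[pos:]
--             curr_Cmax = Cmax(curr_permutation, tasks)
--             if curr_Cmax < best_Cmax:
--                 best_Cmax = curr_Cmax
--                 best_pos = pos
--         # Dodajemy zadanie na najlepszej pozycji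
--         result_permutation = result_permutation[:best_pos] + [task_idx] + result_permutation[best_pos:]
--     return Cmax(result_permutation, tasks)
-- ===== SOURCE B (Python) =====
-- # B: NEH-style insertion search reusing memoized prefix completion vectors (1-D DP)
-- # instead of rebuilding a full (k+1)x(m+1) table per candidate permutation.
-- def _step(a, row, m):
--     out = []
--     prev = 0
--     for j in range(m):
--         prev = max(prev, a[j]) + row[j]
--         out.append(prev)
--     return out
--
-- def _run(v, jobs, tasks, m):
--     for job in jobs:
--         v = _step(v, tasks[job], m)
--     return v
--
-- def jackson(tasks):
--     m = len(tasks[0])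
--     order = sorted(range(len(tasks)), key=lambda x: tasks[x][0])
--     seq = []
--     for x in order:
--         e = [[0] * m]
--         for job in seq:
--             e.append(_step(e[-1], tasks[job], m))
--         best_pos, best = 0, None
--         for pos in range(len(seq) + 1):
--             c = _run(_step(e[pos], tasks[x], m), seq[pos:], tasks, m)[-1]
--             if best is None or c < best:
--                 best, best_pos = c, pos
--         seq = seq[:best_pos] + [x] + seq[best_pos:]
--     return _run([0] * m, seq, tasks, m)[-1]
-- ===== Notes on version B (the rewrite author's own statement) =====
-- stated objective: alternative
-- what changed: B replaces A's per-candidate rebuild of a full (k+1)x(m+1) completion table with memoized prefix completion vectors and a 1-D vector DP, so evaluating an insertion position only folds the inserted task and the suffix through a completion vector (intended as faster; measured ~2.7x at n=4096 but unconfirmed at the largest size).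
import Mathlib
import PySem

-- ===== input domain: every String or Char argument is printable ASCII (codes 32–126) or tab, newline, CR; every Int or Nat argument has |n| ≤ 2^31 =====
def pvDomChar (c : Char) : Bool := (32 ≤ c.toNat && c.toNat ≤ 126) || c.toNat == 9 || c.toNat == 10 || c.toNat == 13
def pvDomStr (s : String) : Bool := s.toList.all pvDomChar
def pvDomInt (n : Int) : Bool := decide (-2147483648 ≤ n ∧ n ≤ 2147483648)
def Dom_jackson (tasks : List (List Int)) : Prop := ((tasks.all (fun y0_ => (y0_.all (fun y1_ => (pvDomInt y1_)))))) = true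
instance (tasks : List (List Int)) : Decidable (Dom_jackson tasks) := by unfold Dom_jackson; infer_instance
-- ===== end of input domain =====

-- B evaluates each insertion position from memoized prefix completion vectors with a 1-D DP
-- instead of rebuilding A's full (k+1)×(m+1) table per candidate permutation; same results.

-- ===== PORT A =====
-- C[i][j] read with default (always in range on inputs admitted by Pre_jackson)
def pvTget (C : List (List Int)) (i j : Int) : Int :=
  PySem.List.pyGetD (PySem.List.pyGetD C i []) j 0

-- C[i][j] = v (read row, set cell, set row; exact for the in-range indices this code produces)
def pvTset (C : List (List Int)) (i j : Int) (v : Int) : List (List Int) :=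
  PySem.List.pySetD C i (PySem.List.pySetD (PySem.List.pyGetD C i []) j v)

def pvCmax (permutation : List Int) (tasks : List (List Int)) : Int :=
  let n : Int := permutation.length
  let m : Int := (PySem.List.pyGetD tasks 0 []).length
  let C := (PySem.List.pyRange 1 (n+1) 1).foldl (fun C i =>
    (PySem.List.pyRange 1 (m+1) 1).foldl (fun C j =>
      pvTset C i j (max (pvTget C (i-1) j) (pvTget C i (j-1)) +
        PySem.List.pyGetD (PySem.List.pyGetD tasks (PySem.List.pyGetD permutation (i-1) 0) []) (j-1) 0)) C)
    (List.replicate (permutation.length + 1) (List.replicate ((PySem.List.pyGetD tasks 0 []).length + 1) (0:Int)))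
  pvTget C n m

-- best_Cmax = float('inf') modeled as Option Int with none = infinity (first candidate always wins)
def jackson (tasks : List (List Int)) : Int :=
  let n : Int := tasks.length
  let available := PySem.List.sorted (PySem.List.pyRange 0 n 1)
    (fun x => PySem.List.pyGetD (PySem.List.pyGetD tasks x []) 0 0) false
  let result := available.foldl (fun (result : List Int) taskIdx =>
    let best := (PySem.List.pyRange 0 ((result.length : Int) + 1) 1).foldl
      (fun (best : Int × Option Int) pos =>
        let curr := PySem.List.slice result none (some pos) ++ [taskIdx] ++ PySem.List.slice result (some pos) none
        let c := pvCmax curr tasks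
        if (match best.2 with | none => true | some b => decide (c < b)) then (pos, some c) else best)
      (0, none)
    PySem.List.slice result none (some best.1) ++ [taskIdx] ++ PySem.List.slice result (some best.1) none) []
  pvCmax result tasks

-- ===== PORT B =====
def pvRowOf (tasks : List (List Int)) (p : Int) : List Int := PySem.List.pyGetD tasks p []

-- _step: one job pushed through the m machines (1-D completion-vector update)
def pvStep (a row : List Int) (m : Int) : List Int :=
  ((PySem.List.pyRange 0 m 1).foldl (fun (st : List Int × Int) j =>
    let prev := max st.2 (PySem.List.pyGetD a j 0) + PySem.List.pyGetD row j 0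
    (st.1 ++ [prev], prev)) ([], 0)).1

-- _run: fold a job sequence through the vector DP
def pvRun (v : List Int) (jobs : List Int) (tasks : List (List Int)) (m : Int) : List Int :=
  jobs.foldl (fun v job => pvStep v (pvRowOf tasks job) m) v

-- best = None modeled as Option Int with none (first candidate always wins)
def jackson_alt (tasks : List (List Int)) : Int :=
  let m : Int := (PySem.List.pyGetD tasks 0 []).length
  let order := PySem.List.sorted (PySem.List.pyRange 0 (tasks.length : Int) 1)
    (fun x => PySem.List.pyGetD (PySem.List.pyGetD tasks x []) 0 0) false
  let seq := order.foldl (fun (seq : List Int) x =>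
    let e := seq.foldl (fun (e : List (List Int)) job =>
      e ++ [pvStep (PySem.List.pyGetD e (-1) []) (pvRowOf tasks job) m]) [List.replicate m.toNat 0]
    let best := (PySem.List.pyRange 0 ((seq.length : Int) + 1) 1).foldl
      (fun (best : Int × Option Int) pos =>
        let c := PySem.List.pyGetD
          (pvRun (pvStep (PySem.List.pyGetD e pos []) (pvRowOf tasks x) m)
            (PySem.List.slice seq (some pos) none) tasks m) (-1) 0
        if (match best.2 with | none => true | some b => decide (c < b)) then (pos, some c) else best)
      (0, none)
    PySem.List.slice seq none (some best.1) ++ [x] ++ PySem.List.slice seq (some best.1) none) []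
  PySem.List.pyGetD (pvRun (List.replicate m.toNat 0) seq tasks m) (-1) 0

-- ===== PRECONDITION & SPEC =====
-- A raises IndexError when tasks is empty, when the first row is empty (sort key tasks[x][0]),
-- or when some row is shorter than the first row (Cmax reads m = len(tasks[0]) columns of every row).
def Pre_jackson (tasks : List (List Int)) : Prop :=
  tasks ≠ [] ∧ 0 < (tasks.headD []).length ∧ ∀ r ∈ tasks, (tasks.headD []).length ≤ r.length
instance (tasks : List (List Int)) : Decidable (Pre_jackson tasks) := by unfold Pre_jackson; infer_instance

def pvWitness_jackson : List (List Int) := [[2, 1], [1, 3], [3, 1]]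

def Spec_jackson (tasks : List (List Int)) (out : Int) : Prop := out = jackson_alt tasks
instance (tasks : List (List Int)) (out : Int) : Decidable (Spec_jackson tasks out) := by unfold Spec_jackson; infer_instance

-- ===== CLAIM (what is proved, stated in full; the proofs are below) =====
def Claim_equal_jackson : Prop := ∀ (tasks : List (List Int)), Dom_jackson tasks → Pre_jackson tasks → Spec_jackson tasks (jackson tasks)

-- ===== LEMMAS AND PROOFS =====

-- proof helpers (used only by the proofs)
def pvMN (tasks : List (List Int)) : Nat := (PySem.List.pyGetD tasks 0 []).length
def pvInit (tasks : List (List Int)) : List Int := List.replicate (pvMN tasks) 0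
def pvZrow (tasks : List (List Int)) : List Int := List.replicate (pvMN tasks + 1) 0

def pvSGo (a trow : List Int) (st : List Int × Int) (js : List Int) : List Int × Int :=
  js.foldl (fun st j =>
    let prev := max st.2 (PySem.List.pyGetD a j 0) + PySem.List.pyGetD trow j 0
    (st.1 ++ [prev], prev)) st

def pvTbl (tasks : List (List Int)) (perm : List Int) : List (List Int) :=
  (List.range (perm.length + 1)).map
    (fun i => 0 :: pvRun (pvInit tasks) (perm.take i) tasks (pvMN tasks : Int))

def pvOStep (tasks : List (List Int)) (perm : List Int) (mI : Int)
    (C : List (List Int)) (i : Int) : List (List Int) :=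
  (PySem.List.pyRange 1 (mI + 1) 1).foldl (fun C j =>
      pvTset C i j (max (pvTget C (i-1) j) (pvTget C i (j-1)) +
        PySem.List.pyGetD (PySem.List.pyGetD tasks (PySem.List.pyGetD perm (i-1) 0) []) (j-1) 0)) C

lemma pvStep_eq_sgo (a trow : List Int) (m : Int) :
    pvStep a trow m = (pvSGo a trow ([], 0) (PySem.List.pyRange 0 m 1)).1 := rfl

lemma pvSGo_length (a trow : List Int) (js : List Int) (st : List Int × Int) :
    ((pvSGo a trow st js).1).length = st.1.length + js.length := by
  induction js generalizing st with
  | nil => simp [pvSGo]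
  | cons j js ih =>
      simp only [pvSGo, List.foldl_cons] at *
      rw [ih]
      simp
      omega

lemma pvStep_length (a trow : List Int) (mN : Nat) :
    (pvStep a trow (mN : Int)).length = mN := by
  rw [pvStep_eq_sgo, pvSGo_length]
  simp [PySem.List.length_pyRange_one]

lemma pvRun_length (tasks : List (List Int)) (jobs : List Int) (mN : Nat) (v : List Int)
    (hv : v.length = mN) : (pvRun v jobs tasks (mN : Int)).length = mN := by
  induction jobs generalizing v with
  | nil => simpa [pvRun]
  | cons j jobs ih =>
      simp only [pvRun, List.foldl_cons] at *
      exact ih _ (pvStep_length _ _ _)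

lemma pvTset_length (C : List (List Int)) (i j : Int) (v : Int) :
    (pvTset C i j v).length = C.length := by
  simp [pvTset, PySem.List.length_pySetD]


lemma pvInner (trow : List Int) (mN : Nat) :
    ∀ (cnt k : Nat), k + cnt = mN →
    ∀ (D : List (List Int)) (iN : Nat) (a out : List Int) (prev : Int),
      1 ≤ iN → iN < D.length →
      PySem.List.pyGetD D ((iN : Int) - 1) [] = 0 :: a →
      PySem.List.pyGetD D (iN : Int) [] = 0 :: (out ++ List.replicate cnt 0) →
      out.length = k →
      prev = (0 :: out).getLast (List.cons_ne_nil 0 out) →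
      (PySem.List.pyRange ((k : Int) + 1) ((mN : Int) + 1) 1).foldl
          (fun C j => pvTset C (iN : Int) j
            (max (pvTget C ((iN : Int) - 1) j) (pvTget C (iN : Int) (j - 1)) +
              PySem.List.pyGetD trow (j - 1) 0)) D
        = PySem.List.pySetD D (iN : Int)
            (0 :: (pvSGo a trow (out, prev) (PySem.List.pyRange (k : Int) (mN : Int) 1)).1) := by
  intro cnt
  induction cnt with
  | zero =>
      intro k hk D iN a out prev h1 hlen hprev hrow hout hp
      obtain rfl : k = mN := by omega
      rw [PySem.List.pyRange_one_eq_nil (le_refl _), PySem.List.pyRange_one_eq_nil (le_refl _)]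
      simp only [List.foldl_nil, pvSGo, PySem.List.pySetD_natCast]
      have hD : D.getD iN [] = 0 :: out := by
        simpa using hrow
      have hD2 : D[iN]'hlen = 0 :: out := by
        rw [← List.getD_eq_getElem D [] hlen, hD]
      rw [← hD2, List.set_getElem_self]
  | succ cnt ih =>
      intro k hk D iN a out prev h1 hlen hprev hrow hout hp
      have hklt : k < mN := by omega
      have hc1 : ((k : Int) + 1) = ((k + 1 : Nat) : Int) := by push_cast; ring
      -- the value written by the next table step = the next vector-DP value
      have hr1 : pvTget D ((iN : Int) - 1) ((k : Int) + 1) = PySem.List.pyGetD a (k : Int) 0 := by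
        simp only [pvTget, hprev, hc1, PySem.List.pyGetD_natCast, List.getD_cons_succ]
      have hr2 : pvTget D (iN : Int) (((k : Int) + 1) - 1) = prev := by
        have : ((k : Int) + 1) - 1 = (k : Int) := by ring
        rw [this]
        simp only [pvTget, hrow, PySem.List.pyGetD_natCast]
        have hsplit : (0 : Int) :: (out ++ List.replicate (cnt + 1) 0) =
            ((0 : Int) :: out) ++ List.replicate (cnt + 1) 0 := by simp
        rw [hsplit, List.getD_append _ _ _ _ (by simp [hout]),
          List.getD_eq_getElem _ _ (by simp [hout]), hp, List.getLast_eq_getElem]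
        congr 1
        simp [hout]
      set newv : Int := max prev (PySem.List.pyGetD a (k : Int) 0) + PySem.List.pyGetD trow (k : Int) 0 with hnewv
      -- peel one iteration of the table loop
      rw [PySem.List.pyRange_one_cons (a := (k : Int) + 1) (b := (mN : Int) + 1)
        (by exact_mod_cast Nat.succ_lt_succ hklt), List.foldl_cons]
      -- peel one iteration of the vector loop
      rw [PySem.List.pyRange_one_cons (a := (k : Int)) (b := (mN : Int)) (by exact_mod_cast hklt)]
      have hsgo : pvSGo a trow (out, prev) ((k : Int) :: PySem.List.pyRange ((k : Int) + 1) (mN : Int) 1)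
          = pvSGo a trow (out ++ [newv], newv) (PySem.List.pyRange ((k : Int) + 1) (mN : Int) 1) := rfl
      rw [hsgo]
      -- the one table step is a row overwrite
      have hstep : pvTset D (iN : Int) ((k : Int) + 1)
            (max (pvTget D ((iN : Int) - 1) ((k : Int) + 1)) (pvTget D (iN : Int) (((k : Int) + 1) - 1)) +
              PySem.List.pyGetD trow (((k : Int) + 1) - 1) 0)
          = PySem.List.pySetD D (iN : Int)
              ((0 : Int) :: ((out ++ [newv]) ++ List.replicate cnt 0)) := by
        rw [hr1, hr2]
        have ht : ((k : Int) + 1) - 1 = (k : Int) := by ring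
        rw [ht, max_comm]
        simp only [pvTset, hrow, hc1, PySem.List.pySetD_natCast, List.set_cons_succ]
        congr 2
        all_goals try rw [List.set_append_right _ _ (le_of_eq hout), hout, Nat.sub_self,
          List.replicate_succ, List.set_cons_zero]
        all_goals simp [hnewv, List.getD_eq_getElem?_getD]
      rw [hstep]
      -- apply the induction hypothesis on the updated table
      have hlen' : iN < (PySem.List.pySetD D (iN : Int) ((0 : Int) :: ((out ++ [newv]) ++ List.replicate cnt 0))).length := by
        rw [PySem.List.length_pySetD]; exact hlen
      have hiN1 : ((iN : Int) - 1) = ((iN - 1 : Nat) : Int) := by omega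
      have hprev' : PySem.List.pyGetD (PySem.List.pySetD D (iN : Int) ((0 : Int) :: ((out ++ [newv]) ++ List.replicate cnt 0))) ((iN : Int) - 1) [] = 0 :: a := by
        rw [hiN1, PySem.List.pyGetD_pySetD_natCast _ _ _ _ _ hlen, if_neg (by omega), ← hiN1, hprev]
      have hrow' : PySem.List.pyGetD (PySem.List.pySetD D (iN : Int) ((0 : Int) :: ((out ++ [newv]) ++ List.replicate cnt 0))) (iN : Int) [] = 0 :: ((out ++ [newv]) ++ List.replicate cnt 0) := by
        rw [PySem.List.pyGetD_pySetD_natCast _ _ _ _ _ hlen, if_pos rfl]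
      have hp' : newv = ((0 : Int) :: (out ++ [newv])).getLast (List.cons_ne_nil 0 (out ++ [newv])) := by
        simp
      have := ih (k + 1) (by omega) _ iN a (out ++ [newv]) newv h1 hlen' hprev' hrow'
        (by simp [hout]) hp'
      rw [hc1, this, PySem.List.pySetD_natCast, PySem.List.pySetD_natCast, PySem.List.pySetD_natCast,
        List.set_set]

lemma pvTstep_append (trow : List Int) (iN : Nat) (h1 : 1 ≤ iN) (C : List (List Int))
    (e : List Int) (hlen : iN < C.length) (j : Int) :
    pvTset (C ++ [e]) (iN : Int) j
        (max (pvTget (C ++ [e]) ((iN : Int) - 1) j) (pvTget (C ++ [e]) (iN : Int) (j - 1)) +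
          PySem.List.pyGetD trow (j - 1) 0)
      = pvTset C (iN : Int) j
          (max (pvTget C ((iN : Int) - 1) j) (pvTget C (iN : Int) (j - 1)) +
            PySem.List.pyGetD trow (j - 1) 0) ++ [e] := by
  have hiN1 : ((iN : Int) - 1) = ((iN - 1 : Nat) : Int) := by omega
  have hg1 : PySem.List.pyGetD (C ++ [e]) ((iN : Int) - 1) [] = PySem.List.pyGetD C ((iN : Int) - 1) [] := by
    rw [hiN1, PySem.List.pyGetD_natCast, PySem.List.pyGetD_natCast,
      List.getD_append _ _ _ _ (by omega)]
  have hg2 : PySem.List.pyGetD (C ++ [e]) (iN : Int) [] = PySem.List.pyGetD C (iN : Int) [] := by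
    rw [PySem.List.pyGetD_natCast, PySem.List.pyGetD_natCast, List.getD_append _ _ _ _ hlen]
  simp only [pvTset, pvTget, hg1, hg2, PySem.List.pySetD_natCast, List.set_append_left _ _ hlen]

lemma pvFrameInner (trow : List Int) (iN : Nat) (h1 : 1 ≤ iN) :
    ∀ (js : List Int) (C : List (List Int)) (e : List Int), iN < C.length →
      js.foldl (fun C j => pvTset C (iN : Int) j
          (max (pvTget C ((iN : Int) - 1) j) (pvTget C (iN : Int) (j - 1)) +
            PySem.List.pyGetD trow (j - 1) 0)) (C ++ [e])
        = js.foldl (fun C j => pvTset C (iN : Int) j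
            (max (pvTget C ((iN : Int) - 1) j) (pvTget C (iN : Int) (j - 1)) +
              PySem.List.pyGetD trow (j - 1) 0)) C ++ [e] := by
  intro js
  induction js with
  | nil => intro C e _; rfl
  | cons j js ih =>
      intro C e hlen
      simp only [List.foldl_cons]
      rw [pvTstep_append trow iN h1 C e hlen j]
      exact ih _ e (by rw [pvTset_length]; exact hlen)

lemma pvOStep_length (tasks : List (List Int)) (perm : List Int) (mI : Int)
    (C : List (List Int)) (i : Int) : (pvOStep tasks perm mI C i).length = C.length := by
  unfold pvOStep
  generalize PySem.List.pyRange 1 (mI + 1) 1 = js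
  induction js generalizing C with
  | nil => rfl
  | cons j js ih => simp only [List.foldl_cons]; rw [ih, pvTset_length]

lemma pvFrameOuter (tasks : List (List Int)) (perm : List Int) (mI : Int) :
    ∀ (R : List Int) (C : List (List Int)) (e : List Int),
      (∀ i' ∈ R, ∃ iN : Nat, i' = (iN : Int) ∧ 1 ≤ iN ∧ iN < C.length) →
      R.foldl (pvOStep tasks perm mI) (C ++ [e]) = R.foldl (pvOStep tasks perm mI) C ++ [e] := by
  intro R
  induction R with
  | nil => intro C e _; rfl
  | cons i R ih =>
      intro C e hR
      obtain ⟨iN, rfl, hi1, hilen⟩ := hR i (List.mem_cons_self ..)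
      simp only [List.foldl_cons]
      have hone : pvOStep tasks perm mI (C ++ [e]) (iN : Int) = pvOStep tasks perm mI C (iN : Int) ++ [e] := by
        unfold pvOStep
        exact pvFrameInner _ iN hi1 _ C e hilen
      rw [hone]
      apply ih
      intro i' hi'
      obtain ⟨iN', rfl, h1', hlen'⟩ := hR i' (List.mem_cons_of_mem _ hi')
      exact ⟨iN', rfl, h1', by rw [pvOStep_length]; exact hlen'⟩

lemma pvTbl_spec (tasks : List (List Int)) : ∀ (perm : List Int),
    (PySem.List.pyRange 1 ((perm.length : Int) + 1) 1).foldl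
        (pvOStep tasks perm ((pvMN tasks : Nat) : Int))
        (List.replicate (perm.length + 1) (pvZrow tasks))
      = pvTbl tasks perm := by
  intro perm
  induction perm using List.reverseRecOn with
  | nil =>
      rw [PySem.List.pyRange_one_eq_nil (by norm_num)]
      simp [pvTbl, pvZrow, pvInit, pvRun, List.replicate_succ]
  | append_singleton perm p ih =>
      have hn : ((perm ++ [p]).length : Int) + 1 = ((perm.length : Int) + 1) + 1 := by
        simp
      rw [hn, PySem.List.pyRange_one_succ_right (by omega), List.foldl_append,
        List.foldl_cons, List.foldl_nil]
      have hrep : List.replicate ((perm ++ [p]).length + 1) (pvZrow tasks)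
          = List.replicate (perm.length + 1) (pvZrow tasks) ++ [pvZrow tasks] := by
        simp [List.replicate_succ']
      rw [hrep]
      -- the first perm.length rows never read the appended job
      have hcongr : (PySem.List.pyRange 1 ((perm.length : Int) + 1) 1).foldl
            (pvOStep tasks (perm ++ [p]) ((pvMN tasks : Nat) : Int))
            (List.replicate (perm.length + 1) (pvZrow tasks) ++ [pvZrow tasks])
          = (PySem.List.pyRange 1 ((perm.length : Int) + 1) 1).foldl
              (pvOStep tasks perm ((pvMN tasks : Nat) : Int))
              (List.replicate (perm.length + 1) (pvZrow tasks) ++ [pvZrow tasks]) := by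
        apply PySem.List.foldl_congr_mem
        intro acc i hi
        obtain ⟨hi1, hi2⟩ := PySem.List.mem_pyRange_one.1 hi
        have hperm : PySem.List.pyGetD (perm ++ [p]) (i - 1) 0 = PySem.List.pyGetD perm (i - 1) 0 := by
          have h01 : (i - 1) = (((i - 1).toNat : Nat) : Int) := by omega
          rw [h01, PySem.List.pyGetD_natCast, PySem.List.pyGetD_natCast,
            List.getD_append _ _ _ _ (by omega)]
        unfold pvOStep
        rw [hperm]
      rw [hcongr]
      -- frame: those rows act only on the first perm.length + 1 rows
      have hframe := pvFrameOuter tasks perm ((pvMN tasks : Nat) : Int)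
        (PySem.List.pyRange 1 ((perm.length : Int) + 1) 1)
        (List.replicate (perm.length + 1) (pvZrow tasks)) (pvZrow tasks) ?_
      · rw [hframe, ih]
        -- the last row: one inner pass = one vector-DP step
        have hlenT : (pvTbl tasks perm).length = perm.length + 1 := by
          simp [pvTbl]
        have hc : ((perm.length : Int) + 1) = (((perm.length + 1 : Nat)) : Int) := by push_cast; ring
        unfold pvOStep
        rw [hc]
        have htrow : PySem.List.pyGetD tasks (PySem.List.pyGetD (perm ++ [p]) (((perm.length + 1 : Nat) : Int) - 1) 0) []
            = pvRowOf tasks p := by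
          have h2 : (((perm.length + 1 : Nat) : Int) - 1) = ((perm.length : Nat) : Int) := by push_cast; ring
          rw [h2, PySem.List.pyGetD_natCast, pvRowOf]
          congr 1
          rw [List.getD_eq_getElem _ _ (by simp), List.getElem_append_right (le_refl _)]
          simp
        rw [htrow]
        have hinner := pvInner (pvRowOf tasks p) (pvMN tasks) (pvMN tasks) 0 (by omega)
          (pvTbl tasks perm ++ [pvZrow tasks]) (perm.length + 1)
          (pvRun (pvInit tasks) perm tasks ((pvMN tasks : Nat) : Int)) [] 0
          (by omega) (by simp [hlenT]) ?_ ?_ rfl rfl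
        · simp only [Nat.cast_zero, zero_add] at hinner
          rw [hinner, ← pvStep_eq_sgo]
          -- and pvTbl of the extended permutation is exactly this
          have htblapp : pvTbl tasks (perm ++ [p])
              = pvTbl tasks perm
                ++ [0 :: pvRun (pvInit tasks) (perm ++ [p]) tasks ((pvMN tasks : Nat) : Int)] := by
            unfold pvTbl
            rw [show (perm ++ [p]).length + 1 = (perm.length + 1) + 1 from by simp]
            rw [List.range_succ (n := perm.length + 1), List.map_append, List.map_singleton]
            congr 1
            · apply List.map_congr_left
              intro i hi
              rw [List.take_append_of_le_length (by exact Nat.le_of_lt_succ (List.mem_range.1 hi))]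
            · rw [List.take_of_length_le (by simp)]
          rw [htblapp, PySem.List.pySetD_natCast,
            List.set_append_right _ _ (by rw [hlenT]), hlenT, Nat.sub_self, List.set_cons_zero]
          congr 3
          unfold pvRun
          rw [List.foldl_append, List.foldl_cons, List.foldl_nil]
        · -- row above: the completed last row of the table for perm
          have h3 : (((perm.length + 1 : Nat) : Int) - 1) = ((perm.length : Nat) : Int) := by push_cast; ring
          rw [h3, PySem.List.pyGetD_natCast, List.getD_append _ _ _ _ (by rw [hlenT]; omega)]
          unfold pvTbl
          rw [PySem.List.getD_map_range _ _ _ _ (by omega), List.take_length]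
        · -- the fresh zero row
          rw [PySem.List.pyGetD_natCast, List.getD_eq_getElem _ _ (by simp [hlenT]),
            List.getElem_append_right (by rw [hlenT])]
          simp [hlenT, pvZrow, List.replicate_succ]
      · intro i' hi'
        obtain ⟨h1, h2⟩ := PySem.List.mem_pyRange_one.1 hi'
        exact ⟨i'.toNat, by omega, by omega, by rw [List.length_replicate]; omega⟩

lemma pvCmax_eq_run (tasks : List (List Int)) (perm : List Int) :
    pvCmax perm tasks
      = PySem.List.pyGetD (pvRun (pvInit tasks) perm tasks ((pvMN tasks : Nat) : Int)) (-1) 0 := by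
  have h0 : pvCmax perm tasks
      = pvTget ((PySem.List.pyRange 1 ((perm.length : Int) + 1) 1).foldl
          (pvOStep tasks perm ((pvMN tasks : Nat) : Int))
          (List.replicate (perm.length + 1) (pvZrow tasks)))
        (perm.length : Int) ((pvMN tasks : Nat) : Int) := rfl
  rw [h0, pvTbl_spec]
  have hvlen : (pvRun (pvInit tasks) perm tasks ((pvMN tasks : Nat) : Int)).length = pvMN tasks :=
    pvRun_length tasks perm (pvMN tasks) _ (by simp [pvInit])
  unfold pvTget pvTbl
  rw [PySem.List.pyGetD_natCast, PySem.List.pyGetD_natCast,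
    PySem.List.getD_map_range _ _ _ _ (by omega), List.take_length]
  rcases Nat.eq_zero_or_pos (pvMN tasks) with hz | hpos
  · have hnil : pvRun (pvInit tasks) perm tasks ((pvMN tasks : Nat) : Int) = [] :=
      List.eq_nil_of_length_eq_zero (by rw [hvlen, hz])
    rw [hnil, hz]
    rfl
  · obtain ⟨m', hm'⟩ : ∃ m', pvMN tasks = m' + 1 := ⟨pvMN tasks - 1, by omega⟩
    rw [hm'] at hvlen ⊢
    have hne : pvRun (pvInit tasks) perm tasks (((m' + 1 : Nat) : Nat) : Int) ≠ [] := by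
      intro h; rw [h] at hvlen; simp at hvlen
    rw [List.getD_cons_succ, PySem.List.pyGetD_neg_one _ _ hne, List.getLast_eq_getElem,
      List.getD_eq_getElem _ _ (by omega)]
    congr 1
    omega

lemma pvE (tasks : List (List Int)) : ∀ (seq : List Int),
    seq.foldl (fun (e : List (List Int)) job =>
        e ++ [pvStep (PySem.List.pyGetD e (-1) []) (pvRowOf tasks job) ((pvMN tasks : Nat) : Int)])
      [pvInit tasks]
    = (List.range (seq.length + 1)).map
        (fun i => pvRun (pvInit tasks) (seq.take i) tasks ((pvMN tasks : Nat) : Int)) := by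
  intro seq
  induction seq using List.reverseRecOn with
  | nil => simp [pvRun]
  | append_singleton seq j ih =>
      rw [List.foldl_append, List.foldl_cons, List.foldl_nil, ih]
      have hlast : PySem.List.pyGetD ((List.range (seq.length + 1)).map
            (fun i => pvRun (pvInit tasks) (seq.take i) tasks ((pvMN tasks : Nat) : Int))) (-1) []
          = pvRun (pvInit tasks) seq tasks ((pvMN tasks : Nat) : Int) := by
        rw [List.range_succ, List.map_append, List.map_singleton,
          PySem.List.pyGetD_neg_one_append_singleton, List.take_length]
      rw [hlast]
      rw [show (seq ++ [j]).length + 1 = (seq.length + 1) + 1 from by simp,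
        List.range_succ (n := seq.length + 1), List.map_append, List.map_singleton]
      congr 1
      · apply List.map_congr_left
        intro i hi
        rw [List.take_append_of_le_length (Nat.le_of_lt_succ (List.mem_range.1 hi))]
      · rw [List.take_of_length_le (by simp)]
        unfold pvRun
        rw [List.foldl_append, List.foldl_cons, List.foldl_nil]

lemma pvCandEq (tasks : List (List Int)) (seq : List Int) (x pos : Int)
    (h0 : 0 ≤ pos) (hlt : pos < (seq.length : Int) + 1) :
    pvCmax (PySem.List.slice seq none (some pos) ++ [x] ++ PySem.List.slice seq (some pos) none) tasks
      = PySem.List.pyGetD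
          (pvRun
            (pvStep
              (PySem.List.pyGetD
                (seq.foldl (fun (e : List (List Int)) job =>
                    e ++ [pvStep (PySem.List.pyGetD e (-1) []) (pvRowOf tasks job) ((pvMN tasks : Nat) : Int)])
                  [pvInit tasks]) pos [])
              (pvRowOf tasks x) ((pvMN tasks : Nat) : Int))
            (PySem.List.slice seq (some pos) none) tasks ((pvMN tasks : Nat) : Int)) (-1) 0 := by
  rw [pvE tasks seq, pvCmax_eq_run]
  have hpN : pos = ((pos.toNat : Nat) : Int) := by omega
  rw [hpN, PySem.List.pyGetD_natCast, PySem.List.getD_map_range _ _ _ _ (by omega),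
    PySem.List.slice_to _ (by omega), PySem.List.slice_from _ (by omega)]
  unfold pvRun
  simp only [List.foldl_append, List.foldl_cons, List.foldl_nil, Int.toNat_natCast]

-- ===== VERDICT (by name: the statement is the Claim_ definition above) =====
set_option maxHeartbeats 1000000 in
theorem jackson_spec : Claim_equal_jackson := by
  intro tasks _ _
  unfold Spec_jackson
  simp only [jackson, jackson_alt, Int.toNat_natCast]
  rw [pvCmax_eq_run]
  refine congrArg (fun s => PySem.List.pyGetD
    (pvRun (pvInit tasks) s tasks ((pvMN tasks : Nat) : Int)) (-1) 0) ?_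
  apply PySem.List.foldl_congr_mem
  intro seq x _
  refine congrArg (fun b : Int × Option Int =>
    PySem.List.slice seq none (some b.1) ++ [x] ++ PySem.List.slice seq (some b.1) none) ?_
  apply PySem.List.foldl_congr_mem
  intro st pos hpos
  obtain ⟨h0, hlt⟩ := PySem.List.mem_pyRange_one.1 hpos
  rw [pvCandEq tasks seq x pos h0 hlt]
  rfl
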